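-- pv_equiv track=rewrite | github.com/brendolyn/STEPIC | Week-2/CyclopeptideSeq.py | Spectrum
-- ===== SOURCE A (Python) =====
-- def Spectrum(seq,Spec):
--   spec = [0]
--   for i in range(len(seq)):
--     v=0
--     for j in range(len(seq)-i):
--       v+=seq[(i+j)%len(seq)]
--       if v not in Spec:
--         return False
--   return sum(seq) in Spec
-- ===== SOURCE B (Python) =====
-- def Spectrum(seq, Spec):
--     n = len(seq)
--     P = [0] * (n + 1)
--     for k in range(1, n + 1):
--         P[k] = P[k - 1] + seq[k - 1]
--     specset = set(Spec)
--     for i in range(n):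
--         for k in range(i + 1, n + 1):
--             if P[k] - P[i] not in specset:
--                 return False
--     return P[n] in specset
-- ===== Notes on version B (the rewrite author's own statement) =====
-- stated objective: alternative
-- what changed: Replaces the per-start incremental accumulator with modular indexing by a prefix-sum table consulted by differencing, and repeated linear 'in Spec' list scans by one hash set built once; it trades upfront table/set construction for cheaper per-segment work.
import Mathlib
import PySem

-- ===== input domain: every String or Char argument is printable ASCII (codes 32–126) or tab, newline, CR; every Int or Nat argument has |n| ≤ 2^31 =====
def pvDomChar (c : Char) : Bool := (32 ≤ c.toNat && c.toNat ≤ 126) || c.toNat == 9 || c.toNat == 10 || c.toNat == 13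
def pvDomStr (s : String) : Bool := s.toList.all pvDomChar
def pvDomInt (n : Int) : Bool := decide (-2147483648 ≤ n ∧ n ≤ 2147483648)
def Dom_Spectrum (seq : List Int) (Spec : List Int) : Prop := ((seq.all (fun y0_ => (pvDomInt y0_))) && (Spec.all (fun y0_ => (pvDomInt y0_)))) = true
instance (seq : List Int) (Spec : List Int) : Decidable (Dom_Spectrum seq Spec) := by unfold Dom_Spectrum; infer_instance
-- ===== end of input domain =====

-- B replaces A's per-start incremental accumulator (with modular indexing) by a prefix-sum
-- table consulted by differencing, and the repeated linear `in Spec` scan by a set built once.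

-- ===== PORT A =====
-- inner loop of A: j over the given list, accumulator v; early `return False`.
-- (the index (i+j) % n is always in range here, so List.getD is exact for seq[(i+j)%len(seq)])
def pvAJ (seq Spec : List Int) (n i : Nat) : List Nat → Int → Bool
  | [], _ => true
  | j :: rest, v =>
    let v' := v + seq.getD ((i + j) % n) 0
    if Spec.contains v' then pvAJ seq Spec n i rest v' else false

def Spectrum (seq : List Int) (Spec : List Int) : Bool :=
  let n := seq.length
  if (List.range n).all (fun i => pvAJ seq Spec n i (List.range (n - i)) 0) then
    Spec.contains seq.sum
  else false

-- ===== PORT B =====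
-- the loop `for k in range(1,n+1): P[k] = P[k-1] + seq[k-1]` building the prefix table
def pvScan (acc : Int) : List Int → List Int
  | [] => []
  | x :: xs => (acc + x) :: pvScan (acc + x) xs

def Spectrum_alt (seq : List Int) (Spec : List Int) : Bool :=
  let n := seq.length
  let P := 0 :: pvScan 0 seq
  let s : PySem.Set Int := PySem.Set.ofList Spec
  if (List.range n).all (fun i =>
      (List.range' (i + 1) (n - i)).all
        (fun k => PySem.Set.contains s (P.getD k 0 - P.getD i 0))) then
    PySem.Set.contains s (P.getD n 0)
  else false

-- ===== PRECONDITION & SPEC =====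
def Spec_Spectrum (seq : List Int) (Spec : List Int) (out : Bool) : Prop := out = Spectrum_alt seq Spec
instance (seq : List Int) (Spec : List Int) (out : Bool) : Decidable (Spec_Spectrum seq Spec out) := by unfold Spec_Spectrum; infer_instance

-- ===== CLAIM (what is proved, stated in full; the proofs are below) =====
def Claim_equal_Spectrum : Prop := ∀ (seq : List Int) (Spec : List Int), Dom_Spectrum seq Spec → Spec_Spectrum seq Spec (Spectrum seq Spec)

-- ===== LEMMAS AND PROOFS =====

theorem pvAllCongr {α : Type} (l : List α) (p q : α → Bool) (h : ∀ x ∈ l, p x = q x) :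
    l.all p = l.all q := by
  induction l with
  | nil => rfl
  | cons a l ih =>
    simp only [List.all_cons, h a (List.mem_cons_self), ih (fun x hx => h x (List.mem_cons_of_mem a hx))]

theorem pvScan_getD (seq : List Int) : ∀ (acc : Int) (k : Nat), k ≤ seq.length →
    (acc :: pvScan acc seq).getD k 0 = acc + (seq.take k).sum := by
  induction seq with
  | nil =>
    intro acc k hk
    have : k = 0 := Nat.le_zero.mp hk
    subst this; simp
  | cons x xs ih =>
    intro acc k hk
    cases k with
    | zero => simp
    | succ k =>
      have := ih (acc + x) k (by simpa using hk)
      simpa [pvScan, add_assoc] using this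

theorem pvAJ_eq (seq Spec : List Int) (i : Nat) :
    ∀ (cnt j : Nat), i + j + cnt ≤ seq.length →
    pvAJ seq Spec seq.length i (List.range' j cnt)
        ((seq.take (i + j)).sum - (seq.take i).sum)
      = (List.range' (i + j + 1) cnt).all
          (fun k => Spec.contains ((seq.take k).sum - (seq.take i).sum)) := by
  intro cnt
  induction cnt with
  | zero => intro j _; simp [pvAJ]
  | succ c ih =>
    intro j hle
    have hlt : i + j < seq.length := by omega
    have hmod : (i + j) % seq.length = i + j := Nat.mod_eq_of_lt hlt
    rw [List.range'_succ, List.range'_succ]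
    show (if Spec.contains ((seq.take (i + j)).sum - (seq.take i).sum
            + seq.getD ((i + j) % seq.length) 0) = true then
            pvAJ seq Spec seq.length i (List.range' (j + 1) c)
              ((seq.take (i + j)).sum - (seq.take i).sum + seq.getD ((i + j) % seq.length) 0)
          else false) = _
    have hv : (seq.take (i + j)).sum - (seq.take i).sum + seq.getD ((i + j) % seq.length) 0
        = (seq.take (i + j + 1)).sum - (seq.take i).sum := by
      rw [hmod, List.getD_eq_getElem seq 0 hlt, List.sum_take_succ seq (i + j) hlt]; ring
    rw [hv, List.all_cons]
    by_cases h : Spec.contains ((seq.take (i + j + 1)).sum - (seq.take i).sum) = true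
    · rw [if_pos h, h, Bool.true_and]
      have := ih (j + 1) (by omega)
      rw [show i + (j + 1) = i + j + 1 by ring] at this
      exact this
    · rw [if_neg h, Bool.not_eq_true] at *
      rw [h, Bool.false_and]

theorem Spectrum_spec_aux (seq Spec : List Int) : Spectrum seq Spec = Spectrum_alt seq Spec := by
  have hset : ∀ x : Int, PySem.Set.contains (PySem.Set.ofList Spec) x = Spec.contains x := by
    intro x
    rw [PySem.Set.contains_eq_listContains, List.contains_eq_mem, List.contains_eq_mem,
      decide_eq_decide]
    exact PySem.Set.mem_ofList Spec x
  have hP : ∀ k, k ≤ seq.length → (0 :: pvScan 0 seq).getD k 0 = (seq.take k).sum := by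
    intro k hk; rw [pvScan_getD seq 0 k hk]; ring
  have hall : (List.range seq.length).all
        (fun i => pvAJ seq Spec seq.length i (List.range (seq.length - i)) 0)
      = (List.range seq.length).all (fun i =>
        (List.range' (i + 1) (seq.length - i)).all
          (fun k => PySem.Set.contains (PySem.Set.ofList Spec)
            ((0 :: pvScan 0 seq).getD k 0 - (0 :: pvScan 0 seq).getD i 0))) := by
    apply pvAllCongr
    intro i hi
    have hi' : i < seq.length := List.mem_range.mp hi
    have h0 : ((seq.take (i + 0)).sum - (seq.take i).sum) = 0 := by simp
    have hx := pvAJ_eq seq Spec i (seq.length - i) 0 (by omega)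
    rw [h0] at hx
    rw [List.range_eq_range', hx]
    apply pvAllCongr
    intro k hk
    have hk' : k ≤ seq.length := by
      have := List.mem_range'_1.mp hk; omega
    rw [hset, hP k hk', hP i (le_of_lt hi')]
  simp only [Spectrum, Spectrum_alt]
  rw [hall]
  by_cases hc : (List.range seq.length).all (fun i =>
        (List.range' (i + 1) (seq.length - i)).all
          (fun k => PySem.Set.contains (PySem.Set.ofList Spec)
            ((0 :: pvScan 0 seq).getD k 0 - (0 :: pvScan 0 seq).getD i 0))) = true
  · rw [if_pos hc, if_pos hc, hset, hP seq.length le_rfl, List.take_length]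
  · rw [if_neg hc, if_neg hc]

-- ===== VERDICT (by name: the statement is the Claim_ definition above) =====
theorem Spectrum_spec : Claim_equal_Spectrum := by
  intro seq Spec _
  unfold Spec_Spectrum
  exact Spectrum_spec_aux seq Spec
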